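-- pv_equiv track=rewrite | github.com/Ugo5738/swimbuddz-backend | services/members_service/services/member_service.py | merge_tiers_after_club_activation
-- ===== SOURCE A (Python) =====
-- from typing import Optional
--
-- TIER_PRIORITY = {"academy": 3, "club": 2, "community": 1}
--
-- def merge_tiers_after_club_activation(
--     current_tiers: Optional[list[str]],
--     current_tier: Optional[str],
--     requested_tiers: Optional[list[str]],
--     was_already_approved: bool,
-- ) -> tuple[list[str], str, Optional[list[str]]]:
--     """
--     Compute new tier state after club activation.
--
--     Args:
--         current_tiers: Currently approved tiers
--         current_tier: Current primary tier
--         requested_tiers: Currently requested tiers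
--         was_already_approved: True if club was already in approved_tiers
--
--     Returns:
--         Tuple of (new_tiers_list, new_primary_tier, remaining_requested_tiers)
--     """
--     # Build updated set
--     approved = set(current_tiers or [])
--     if current_tier:
--         approved.add(current_tier)
--     approved.update({"club", "community"})
--
--     # Sort by priority
--     sorted_tiers = sorted(
--         [t for t in approved if t in TIER_PRIORITY],
--         key=lambda t: TIER_PRIORITY[t],
--         reverse=True,
--     )
--
--     # Determine new primary
--     current_priority = TIER_PRIORITY.get(current_tier or "", 0)
--     top_priority = TIER_PRIORITY.get(sorted_tiers[0], 0) if sorted_tiers else 0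
--     new_primary = (
--         sorted_tiers[0]
--         if top_priority > current_priority
--         else (current_tier or sorted_tiers[0])
--     )
--
--     # Clean up requested tiers
--     remaining = None
--     if requested_tiers:
--         if was_already_approved:
--             # Clear any stale club/academy/community requests
--             remaining = [
--                 t for t in requested_tiers if t not in {"club", "academy", "community"}
--             ]
--         else:
--             # Only clear club/community since academy might still be pending
--             remaining = [t for t in requested_tiers if t not in {"club", "community"}]
--         remaining = remaining if remaining else None
--
--     return sorted_tiers, new_primary, remaining
-- ===== SOURCE B (Python) =====
-- from typing import Optional
--
-- TIER_PRIORITY = {"academy": 3, "club": 2, "community": 1}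
--
-- def merge_tiers_after_club_activation(
--     current_tiers: Optional[list[str]],
--     current_tier: Optional[str],
--     requested_tiers: Optional[list[str]],
--     was_already_approved: bool,
-- ) -> tuple[list[str], str, Optional[list[str]]]:
--     # No set, no sort, no priority lookups: the only question is whether
--     # "academy" is present; club and community are always granted.
--     has_academy = current_tier == "academy" or "academy" in (current_tiers or [])
--     sorted_tiers = (["academy"] if has_academy else []) + ["club", "community"]
--
--     # Primary stays with current_tier only when nothing strictly outranks it.
--     if current_tier == "academy" or (current_tier == "club" and not has_academy):
--         new_primary = current_tier
--     else:
--         new_primary = sorted_tiers[0]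
--
--     drop = {"club", "academy", "community"} if was_already_approved else {"club", "community"}
--     remaining = [t for t in (requested_tiers or []) if t not in drop] or None
--     return sorted_tiers, new_primary, remaining
-- ===== Notes on version B (the rewrite author's own statement) =====
-- stated objective: simpler
-- what changed: B drops A's set construction, comparison sort with a priority-key lambda, and TIER_PRIORITY lookups entirely: since club and community are always granted, the only datum is whether 'academy' is present, so B builds the fixed descending tier list directly and picks the primary by two membership tests.
import Mathlib
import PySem

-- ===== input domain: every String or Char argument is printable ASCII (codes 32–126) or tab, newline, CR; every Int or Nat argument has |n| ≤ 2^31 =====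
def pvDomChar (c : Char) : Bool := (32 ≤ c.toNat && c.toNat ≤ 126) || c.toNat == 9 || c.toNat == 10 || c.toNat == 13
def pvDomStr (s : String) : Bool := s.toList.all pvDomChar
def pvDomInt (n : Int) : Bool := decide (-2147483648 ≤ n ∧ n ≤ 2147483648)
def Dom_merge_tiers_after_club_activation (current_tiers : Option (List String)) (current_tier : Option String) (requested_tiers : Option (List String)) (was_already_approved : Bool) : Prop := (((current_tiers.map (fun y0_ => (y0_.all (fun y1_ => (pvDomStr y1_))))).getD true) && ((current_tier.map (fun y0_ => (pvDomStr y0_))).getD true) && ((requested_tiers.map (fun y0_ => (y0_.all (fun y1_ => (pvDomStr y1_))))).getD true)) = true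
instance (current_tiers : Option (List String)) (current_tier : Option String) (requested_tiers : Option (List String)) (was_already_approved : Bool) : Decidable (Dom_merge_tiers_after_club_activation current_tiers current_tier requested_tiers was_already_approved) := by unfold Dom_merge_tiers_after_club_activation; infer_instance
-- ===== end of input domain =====

-- B replaces A's set-building + priority sort + priority lookups by a single membership
-- test for "academy" and a fixed-order list; objective: simpler (same output everywhere).

-- ===== PORT A =====
def TIER_PRIORITY : PySem.Dict String Int :=
  ⟨[("academy", 3), ("club", 2), ("community", 1)]⟩

def merge_tiers_after_club_activation (current_tiers : Option (List String)) (current_tier : Option String) (requested_tiers : Option (List String)) (was_already_approved : Bool) : List String × String × Option (List String) :=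
  -- approved = set(current_tiers or []); if current_tier: approved.add(current_tier); approved.update({"club","community"})
  let ctv := current_tier.getD ""
  let approved0 := PySem.Set.ofList (current_tiers.getD [])
  let approved1 := if ctv ≠ "" then PySem.Set.add approved0 ctv else approved0
  let approved := PySem.Set.update approved1 ["club", "community"]
  -- sorted([t for t in approved if t in TIER_PRIORITY], key=priority, reverse=True)
  let sorted_tiers := PySem.List.sorted
    (approved.filter (fun t => PySem.Dict.contains TIER_PRIORITY t))
    (fun t => PySem.Dict.getD TIER_PRIORITY t 0) true
  let current_priority := PySem.Dict.getD TIER_PRIORITY ctv 0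
  let top_priority := match sorted_tiers with
    | [] => (0 : Int)
    | t :: _ => PySem.Dict.getD TIER_PRIORITY t 0
  -- sorted_tiers[0] is only evaluated when sorted_tiers ≠ [] (headD's default is unreachable)
  let new_primary := if top_priority > current_priority then sorted_tiers.headD ""
    else (if ctv ≠ "" then ctv else sorted_tiers.headD "")
  let rtl := requested_tiers.getD []
  let remaining : Option (List String) :=
    if rtl ≠ [] then
      let rem := if was_already_approved then
          rtl.filter (fun t => !(["club", "academy", "community"].contains t))
        else
          rtl.filter (fun t => !(["club", "community"].contains t))
      if rem ≠ [] then some rem else none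
    else none
  (sorted_tiers, new_primary, remaining)

-- ===== PORT B =====
def merge_tiers_after_club_activation_alt (current_tiers : Option (List String)) (current_tier : Option String) (requested_tiers : Option (List String)) (was_already_approved : Bool) : List String × String × Option (List String) :=
  let has_academy := (current_tier == some "academy") || (current_tiers.getD []).contains "academy"
  let sorted_tiers := (if has_academy then ["academy"] else []) ++ ["club", "community"]
  let new_primary := if (current_tier == some "academy") || ((current_tier == some "club") && !has_academy)
    then current_tier.getD "" else sorted_tiers.headD ""
  let drop := if was_already_approved then ["club", "academy", "community"] else ["club", "community"]
  let keep := (requested_tiers.getD []).filter (fun t => !(drop.contains t))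
  let remaining : Option (List String) := if keep.isEmpty then none else some keep
  (sorted_tiers, new_primary, remaining)

-- ===== PRECONDITION & SPEC =====
def Spec_merge_tiers_after_club_activation (current_tiers : Option (List String)) (current_tier : Option String) (requested_tiers : Option (List String)) (was_already_approved : Bool) (out : List String × String × Option (List String)) : Prop := out = merge_tiers_after_club_activation_alt current_tiers current_tier requested_tiers was_already_approved
instance (current_tiers : Option (List String)) (current_tier : Option String) (requested_tiers : Option (List String)) (was_already_approved : Bool) (out : List String × String × Option (List String)) : Decidable (Spec_merge_tiers_after_club_activation current_tiers current_tier requested_tiers was_already_approved out) := by unfold Spec_merge_tiers_after_club_activation; infer_instance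

-- ===== CLAIM (what is proved, stated in full; the proofs are below) =====
def Claim_equal_merge_tiers_after_club_activation : Prop := ∀ (current_tiers : Option (List String)) (current_tier : Option String) (requested_tiers : Option (List String)) (was_already_approved : Bool), Dom_merge_tiers_after_club_activation current_tiers current_tier requested_tiers was_already_approved → Spec_merge_tiers_after_club_activation current_tiers current_tier requested_tiers was_already_approved (merge_tiers_after_club_activation current_tiers current_tier requested_tiers was_already_approved)

-- ===== LEMMAS AND PROOFS =====

set_option maxRecDepth 4000

theorem tierD (s : String) : PySem.Dict.getD TIER_PRIORITY s 0
    = if s = "academy" then 3 else if s = "club" then 2 else if s = "community" then 1 else 0 := by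
  by_cases h1 : s = "academy"
  · subst h1; decide
  by_cases h2 : s = "club"
  · subst h2; decide
  by_cases h3 : s = "community"
  · subst h3; decide
  rw [if_neg h1, if_neg h2, if_neg h3, PySem.Dict.getD_eq_get?_getD]
  show (PySem.Dict.get? ⟨[("academy", 3), ("club", 2), ("community", 1)]⟩ s).getD 0 = 0
  rw [PySem.Dict.get?_mk_cons, if_neg, PySem.Dict.get?_mk_cons, if_neg,
    PySem.Dict.get?_mk_cons, if_neg]
  · rfl
  · simp [beq_iff_eq]; exact fun h => h3 h.symm
  · simp [beq_iff_eq]; exact fun h => h2 h.symm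
  · simp [beq_iff_eq]; exact fun h => h1 h.symm

theorem tierC (s : String) : PySem.Dict.contains TIER_PRIORITY s
    = (s == "academy" || s == "club" || s == "community") := by
  by_cases h1 : s = "academy"
  · subst h1; decide
  by_cases h2 : s = "club"
  · subst h2; decide
  by_cases h3 : s = "community"
  · subst h3; decide
  have e1 : ((s == "academy") : Bool) = false := by simp [beq_iff_eq, h1]
  have e2 : ((s == "club") : Bool) = false := by simp [beq_iff_eq, h2]
  have e3 : ((s == "community") : Bool) = false := by simp [beq_iff_eq, h3]
  have f1 : (("academy" == s) : Bool) = false := by simp [beq_iff_eq]; exact fun h => h1 h.symm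
  have f2 : (("club" == s) : Bool) = false := by simp [beq_iff_eq]; exact fun h => h2 h.symm
  have f3 : (("community" == s) : Bool) = false := by simp [beq_iff_eq]; exact fun h => h3 h.symm
  show ([("academy", (3:Int)), ("club", 2), ("community", 1)].any fun p => p.1 == s)
      = (s == "academy" || s == "club" || s == "community")
  simp [e1, e2, e3, f1, f2, f3]

-- any nodup list over the three tiers containing club and community sorts (reverse, by priority)
-- to the fixed descending order
theorem sorted_fixed (l : List String) (hnd : l.Nodup)
    (hsub : ∀ t ∈ l, t = "academy" ∨ t = "club" ∨ t = "community")
    (hc : "club" ∈ l) (hm : "community" ∈ l) :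
    PySem.List.sorted l (fun t => PySem.Dict.getD TIER_PRIORITY t 0) true
      = (if "academy" ∈ l then ["academy", "club", "community"] else ["club", "community"]) := by
  by_cases ha : "academy" ∈ l
  · rw [if_pos ha]
    apply PySem.List.sorted_rev_eq_of_perm_of_pairwise_gt
    · refine (List.perm_ext_iff_of_nodup (by decide) hnd).mpr ?_
      intro a
      constructor
      · intro h
        simp only [List.mem_cons, List.not_mem_nil, or_false] at h
        rcases h with h|h|h <;> subst h <;> assumption
      · intro h
        rcases hsub a h with h'|h'|h' <;> simp [h']
    · simp [tierD]
  · rw [if_neg ha]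
    apply PySem.List.sorted_rev_eq_of_perm_of_pairwise_gt
    · refine (List.perm_ext_iff_of_nodup (by decide) hnd).mpr ?_
      intro a
      constructor
      · intro h
        simp only [List.mem_cons, List.not_mem_nil, or_false] at h
        rcases h with h|h <;> subst h <;> assumption
      · intro h
        rcases hsub a h with h'|h'|h'
        · exact absurd (h' ▸ h) ha
        · simp [h']
        · simp [h']
    · simp [tierD]

-- the requested-tiers clean-up: A's guarded filter equals B's filter-then-isEmpty
theorem rem_eq (p : String → Bool) (rtl : List String) :
    (if rtl ≠ [] then (if rtl.filter p ≠ [] then some (rtl.filter p) else none) else none)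
      = (if (rtl.filter p).isEmpty then none else some (rtl.filter p)) := by
  rcases eq_or_ne rtl [] with h|h
  · subst h; simp
  · rw [if_pos h]
    rcases eq_or_ne (rtl.filter p) [] with h2|h2 <;> simp [h2, List.isEmpty_iff]

theorem main_equiv : ∀ (current_tiers : Option (List String)) (current_tier : Option String) (requested_tiers : Option (List String)) (was_already_approved : Bool),
    merge_tiers_after_club_activation current_tiers current_tier requested_tiers was_already_approved
      = merge_tiers_after_club_activation_alt current_tiers current_tier requested_tiers was_already_approved := by
  intro ct tier rt w
  unfold merge_tiers_after_club_activation merge_tiers_after_club_activation_alt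
  dsimp only
  set ctv := tier.getD "" with hctv
  set ctl := ct.getD [] with hctl
  set approved1 := (if ctv ≠ "" then PySem.Set.add (PySem.Set.ofList ctl) ctv else PySem.Set.ofList ctl) with happ1
  set approved := PySem.Set.update approved1 ["club", "community"] with happ
  set l := approved.filter (fun t => PySem.Dict.contains TIER_PRIORITY t) with hl
  have hmem : ∀ y, y ∈ approved ↔ (y ∈ ctl ∨ (ctv ≠ "" ∧ y = ctv)) ∨ y = "club" ∨ y = "community" := by
    intro y
    rw [happ, PySem.Set.mem_update, happ1]
    constructor
    · rintro (h|h)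
      · split_ifs at h with hne
        · rcases (PySem.Set.mem_add _ _ _).mp h with h'|h'
          · exact Or.inl (Or.inl ((PySem.Set.mem_ofList _ _).mp h'))
          · exact Or.inl (Or.inr ⟨hne, h'⟩)
        · exact Or.inl (Or.inl ((PySem.Set.mem_ofList _ _).mp h))
      · simp only [List.mem_cons, List.not_mem_nil, or_false] at h
        exact Or.inr h
    · rintro ((h|⟨hne, h⟩)|h|h)
      · refine Or.inl ?_
        split_ifs with hne
        · exact (PySem.Set.mem_add _ _ _).mpr (Or.inl ((PySem.Set.mem_ofList _ _).mpr h))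
        · exact (PySem.Set.mem_ofList _ _).mpr h
      · refine Or.inl ?_
        rw [if_pos hne]
        exact (PySem.Set.mem_add _ _ _).mpr (Or.inr h)
      · exact Or.inr (by simp [h])
      · exact Or.inr (by simp [h])
  have hnd : approved.Nodup := by
    apply PySem.Set.nodup_update
    rw [happ1]; split_ifs
    · exact PySem.Set.nodup_add _ _ (PySem.Set.nodup_ofList ctl)
    · exact PySem.Set.nodup_ofList ctl
  have hlmem : ∀ y, y ∈ l ↔ (y ∈ approved ∧ (y = "academy" ∨ y = "club" ∨ y = "community")) := by
    intro y
    rw [hl, List.mem_filter, tierC]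
    simp only [Bool.or_eq_true, beq_iff_eq, or_assoc]
  have hsorted : PySem.List.sorted l (fun t => PySem.Dict.getD TIER_PRIORITY t 0) true
      = (if "academy" ∈ l then ["academy", "club", "community"] else ["club", "community"]) := by
    apply sorted_fixed _ (hnd.filter _)
    · intro t ht; exact ((hlmem t).mp ht).2
    · exact (hlmem _).mpr ⟨(hmem _).mpr (Or.inr (Or.inl rfl)), Or.inr (Or.inl rfl)⟩
    · exact (hlmem _).mpr ⟨(hmem _).mpr (Or.inr (Or.inr rfl)), Or.inr (Or.inr rfl)⟩
  have hacadmem : ("academy" ∈ l) ↔ ("academy" ∈ ctl ∨ ctv = "academy") := by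
    rw [hlmem]
    constructor
    · rintro ⟨hm', -⟩
      rcases (hmem _).mp hm' with (h|⟨-, h⟩)|h|h
      · exact Or.inl h
      · exact Or.inr h.symm
      · exact absurd h (by decide)
      · exact absurd h (by decide)
    · intro h
      refine ⟨(hmem _).mpr ?_, Or.inl rfl⟩
      rcases h with h|h
      · exact Or.inl (Or.inl h)
      · exact Or.inl (Or.inr ⟨by rw [h]; decide, h.symm⟩)
  have hboolA : ((tier == some "academy") || ctl.contains "academy")
      = (if "academy" ∈ l then true else false) := by
    by_cases hA : "academy" ∈ l
    · rw [if_pos hA]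
      rcases hacadmem.mp hA with h|h
      · simp [h]
      · cases tier with
        | none => exact absurd h (by rw [hctv]; decide)
        | some s =>
          have : s = "academy" := by rwa [hctv] at h
          simp [this]
    · rw [if_neg hA]
      have h := hacadmem.not.mp hA
      push_neg at h
      obtain ⟨h1, h2⟩ := h
      have e2 : ((tier == some "academy") : Bool) = false := by
        cases tier with
        | none => rfl
        | some s => simpa [beq_iff_eq] using fun hs => h2 (by rw [hctv, hs]; rfl)
      simp [e2, h1]
  rw [hsorted]
  by_cases hA : "academy" ∈ l <;>
    rw [hboolA] <;> simp only [hA, if_pos, if_neg, if_true, if_false, reduceIte] <;>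
    refine congrArg₂ Prod.mk rfl (congrArg₂ Prod.mk ?_ ?_)
  -- academy present: primary
  · by_cases ht : ctv = "academy"
    · have hcur : PySem.Dict.getD TIER_PRIORITY ctv 0 = 3 := by rw [tierD, if_pos ht]
      have htier : tier = some "academy" := by
        cases tier with
        | none => exact absurd ht (by rw [hctv]; decide)
        | some s => exact congrArg some ht
      simp only [List.headD_cons, hcur, htier]
      rw [if_neg (by rw [tierD]; decide), if_pos (by rw [ht]; decide)]
      simp [ht, beq_iff_eq]
    · have hcur : PySem.Dict.getD TIER_PRIORITY ctv 0 < 3 := by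
        rw [tierD, if_neg ht]; split_ifs <;> omega
      have htier : ((tier == some "academy") : Bool) = false := by
        cases tier with
        | none => rfl
        | some s => simpa [beq_iff_eq] using fun hs => ht (by rw [hctv, hs]; rfl)
      rw [if_pos (by rw [tierD]; simpa using hcur)]
      simp [htier]
  -- academy present: remaining
  · rcases eq_or_ne w true with hw|hw <;> simp only [hw, if_true, if_false, Bool.not_true, reduceIte] <;>
      exact rem_eq _ _
  -- academy absent: primary
  · have hnacad : ctv ≠ "academy" := fun h => hA (hacadmem.mpr (Or.inr h))
    by_cases ht : ctv = "club"
    · have hcur : PySem.Dict.getD TIER_PRIORITY ctv 0 = 2 := by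
        rw [tierD, if_neg hnacad, if_pos ht]
      have htier : tier = some "club" := by
        cases tier with
        | none => exact absurd ht (by rw [hctv]; decide)
        | some s => exact congrArg some ht
      simp only [List.headD_cons, hcur, htier]
      rw [if_neg (by rw [tierD]; decide), if_pos (by rw [ht]; decide)]
      simp [ht, beq_iff_eq]
    · have hcur : PySem.Dict.getD TIER_PRIORITY ctv 0 < 2 := by
        rw [tierD, if_neg hnacad, if_neg ht]; split_ifs <;> omega
      have htier1 : ((tier == some "academy") : Bool) = false := by
        cases tier with
        | none => rfl
        | some s => simpa [beq_iff_eq] using fun hs => hnacad (by rw [hctv, hs]; rfl)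
      have htier2 : ((tier == some "club") : Bool) = false := by
        cases tier with
        | none => rfl
        | some s => simpa [beq_iff_eq] using fun hs => ht (by rw [hctv, hs]; rfl)
      rw [if_pos (by rw [tierD]; simpa using hcur)]
      simp [htier1, htier2]
  -- academy absent: remaining
  · rcases eq_or_ne w true with hw|hw <;> simp only [hw, if_true, if_false, Bool.not_true, reduceIte] <;>
      exact rem_eq _ _

-- ===== VERDICT (by name: the statement is the Claim_ definition above) =====
theorem merge_tiers_after_club_activation_spec : Claim_equal_merge_tiers_after_club_activation := by
  intro a b c d _
  exact main_equiv a b c d
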